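-- pv_equiv track=rewrite | github.com/ewanmwalker/NCL_Uni_Python_R_Analysis_Code | 8.1 - enum times plotted for varying list size.py | enumcount
-- ===== SOURCE A (Python) =====
-- def enumcount(x):
--     """
--     Returns a list with a count of how many values
--     come before each element in x
--     """
--     n = len(x)
--     c = [0 for i in range(n)]
--     for i in range(1,n):
--         for j in range(0,i):
--             if x[i] < x[j]:
--                 c[j] = c[j]+1
--             else:
--                 c[i] = c[i]+1
--     return c
-- ===== SOURCE B (Python) =====
-- def enumcount(x):
--     """
--     Returns a list with a count of how many values
--     come before each element in x
--     """
--     order = sorted(range(len(x)), key=lambda j: x[j])  # stable argsort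
--     c = [0] * len(x)
--     for pos, j in enumerate(order):
--         c[j] = pos
--     return c
-- ===== Notes on version B (the rewrite author's own statement) =====
-- stated objective: faster
-- what changed: Replaced A's O(n^2) all-pairs comparison loop (which increments one of two counters per pair) by a stable argsort of the indices keyed by value: each element's count is exactly its position in the stable sort, so B sorts once and writes the inverse permutation.
import Mathlib
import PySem

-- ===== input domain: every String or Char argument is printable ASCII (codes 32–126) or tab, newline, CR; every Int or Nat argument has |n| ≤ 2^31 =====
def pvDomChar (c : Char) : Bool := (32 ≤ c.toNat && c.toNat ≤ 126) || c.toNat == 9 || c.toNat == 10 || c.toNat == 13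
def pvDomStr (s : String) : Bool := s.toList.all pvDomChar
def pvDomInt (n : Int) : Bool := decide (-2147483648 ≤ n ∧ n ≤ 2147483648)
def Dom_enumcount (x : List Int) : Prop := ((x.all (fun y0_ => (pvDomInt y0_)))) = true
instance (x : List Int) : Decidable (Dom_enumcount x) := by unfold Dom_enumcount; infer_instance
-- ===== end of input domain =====

-- B replaces A's O(n^2) all-pairs counting loop by one stable argsort of the indices
-- and writing its inverse permutation (objective: faster, asymptotic).


-- ===== PORT A =====
def enumcount (x : List Int) : List Int :=
  let n : Int := PySem.List.len x
  let c : List Int := (PySem.List.pyRange 0 n 1).map (fun _ => 0)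
  (PySem.List.pyRange 1 n 1).foldl (fun c i =>
    (PySem.List.pyRange 0 i 1).foldl (fun c j =>
      if PySem.List.pyGetD x i 0 < PySem.List.pyGetD x j 0 then
        PySem.List.pySetD c j (PySem.List.pyGetD c j 0 + 1)
      else
        PySem.List.pySetD c i (PySem.List.pyGetD c i 0 + 1)) c) c

-- ===== PORT B =====
def enumcount_alt (x : List Int) : List Int :=
  let order := PySem.List.sorted (PySem.List.pyRange 0 (PySem.List.len x) 1)
                 (fun j => PySem.List.pyGetD x j 0) false
  let c := PySem.List.pyRepeat [0] (PySem.List.len x)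
  (PySem.List.enumerate order 0).foldl (fun c p => PySem.List.pySetD c p.2 p.1) c

-- ===== PRECONDITION & SPEC =====
def Spec_enumcount (x : List Int) (out : List Int) : Prop := out = enumcount_alt x
instance (x : List Int) (out : List Int) : Decidable (Spec_enumcount x out) := by unfold Spec_enumcount; infer_instance

-- ===== CLAIM (what is proved, stated in full; the proofs are below) =====
def Claim_equal_enumcount : Prop := ∀ (x : List Int), Dom_enumcount x → Spec_enumcount x (enumcount x)

-- ===== LEMMAS AND PROOFS =====

-- The common closed form: ecF x p = #{ j | (x[j],j) <lex (x[p],p) }.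
def ecF (x : List Int) (p : Nat) : Nat :=
  (List.range x.length).countP
    (fun j => decide (x.getD j 0 < x.getD p 0 ∨ (x.getD j 0 = x.getD p 0 ∧ j < p)))

--------------------------------------------------------------------------
-- generic helpers
--------------------------------------------------------------------------

lemma getD_set_eq (c : List Int) (m : Nat) (v : Int) (h : m < c.length) :
    (c.set m v).getD m 0 = v := by
  simp [List.getD_eq_getElem?_getD, h]

lemma getD_set_ne (c : List Int) (m p : Nat) (v : Int) (h : p ≠ m) :
    (c.set m v).getD p 0 = c.getD p 0 := by
  simp [List.getD_eq_getElem?_getD, Ne.symm h]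

lemma getD_all_zero (l : List Int) (p : Nat) (h : ∀ a ∈ l, a = (0:Int)) :
    l.getD p 0 = 0 := by
  rcases hg : l[p]? with _ | a
  · simp [List.getD_eq_getElem?_getD, hg]
  · have := h a (List.mem_of_getElem? hg)
    simp [List.getD_eq_getElem?_getD, hg, this]

lemma countP_or_disjoint {α : Type} (l : List α) (A B : α → Prop)
    [DecidablePred A] [DecidablePred B] (h : ∀ j, ¬ (A j ∧ B j)) :
    l.countP (fun j => decide (A j) || decide (B j)) =
      l.countP (fun j => decide (A j)) + l.countP (fun j => decide (B j)) := by
  induction l with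
  | nil => simp
  | cons a t ih =>
    by_cases hA : A a
    · by_cases hB : B a
      · exact absurd ⟨hA, hB⟩ (h a)
      · simp [hA, hB, ih]; omega
    · by_cases hB : B a
      · simp [hA, hB, ih]
        omega
      · simp [hA, hB, ih]

lemma countP_range_restrict (n p : Nat) (q : Nat → Prop) [DecidablePred q] (hpn : p ≤ n) :
    (List.range n).countP (fun j => decide (j < p ∧ q j)) = (List.range p).countP (fun j => decide (q j)) := by
  have hsplit : n = p + (n - p) := by omega
  rw [hsplit, List.range_add, List.countP_append]
  have h1 : (List.range p).countP (fun j => decide (j < p ∧ q j)) =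
      (List.range p).countP (fun j => decide (q j)) := by
    apply List.countP_congr
    intro j hj
    simp at hj
    simp [hj]
  have h2 : ((List.range (n - p)).map (p + ·)).countP (fun j => decide (j < p ∧ q j)) = 0 := by
    rw [List.countP_map]
    apply List.countP_eq_zero.mpr
    intro j hj
    simp
  omega

--------------------------------------------------------------------------
-- A-side: invariants of the two nested loops
--------------------------------------------------------------------------

-- state after the outer loop has processed i = 1 .. k-1
def aspec (x : List Int) (k p : Nat) : Nat :=
  (List.range k).countP (fun i => decide (p < i ∧ x.getD i 0 < x.getD p 0))
  + (if p < k then (List.range p).countP (fun j => decide (x.getD j 0 ≤ x.getD p 0)) else 0)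

-- state while the inner loop (outer index k) has processed j = 0 .. m-1
def ispec (x : List Int) (k m p : Nat) : Nat :=
  aspec x k p
  + (if p < m ∧ x.getD k 0 < x.getD p 0 then 1 else 0)
  + (if p = k then (List.range m).countP (fun j => decide (x.getD j 0 ≤ x.getD k 0)) else 0)

lemma ispec_zero (x : List Int) (k p : Nat) : ispec x k 0 p = aspec x k p := by
  simp [ispec]

lemma aspec_countP_zero (x : List Int) (k m : Nat) (hm : m ≤ k + 1) :
    (List.range m).countP (fun i => decide (k < i ∧ x.getD i 0 < x.getD k 0)) = 0 := by
  apply List.countP_eq_zero.mpr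
  intro i hi
  simp at hi ⊢
  omega

lemma ispec_last (x : List Int) (k p : Nat) : ispec x k k p = aspec x (k+1) p := by
  unfold ispec aspec
  rcases lt_trichotomy p k with h | h | h
  · have h1 : ¬ p = k := by omega
    rw [if_neg h1, if_pos h, if_pos (by omega : p < k + 1), List.range_succ, List.countP_append]
    simp only [List.countP_cons, List.countP_nil, decide_eq_true_eq]
    split_ifs <;> omega
  · subst h
    rw [aspec_countP_zero x p p (by omega), aspec_countP_zero x p (p+1) (by omega)]
    simp
  · have h1 : ¬ p < k := by omega
    have h2 : ¬ p < k + 1 := by omega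
    have h3 : ¬ p = k := by omega
    rw [if_neg h3, if_neg h1, if_neg h2, List.range_succ, List.countP_append]
    have hz : List.countP (fun i => decide (p < i ∧ x.getD i 0 < x.getD p 0)) [k] = 0 := by
      simp
      omega
    have hf : ¬ (p < k ∧ x.getD k 0 < x.getD p 0) := by
      rintro ⟨hh, _⟩; omega
    rw [hz, if_neg hf]

lemma ispec_succ_m (x : List Int) (k m : Nat) (hm : m < k) (hxy : x.getD k 0 < x.getD m 0) :
    ispec x k (m+1) m = ispec x k m m + 1 := by
  unfold ispec
  have h1 : ¬ (m = k) := by omega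
  rw [if_neg h1, if_neg h1, if_pos ⟨Nat.lt_succ_self m, hxy⟩,
      if_neg (fun h => Nat.lt_irrefl m h.1)]

lemma ispec_succ_kk (x : List Int) (k m : Nat) (hm : m < k) (hxy : ¬ x.getD k 0 < x.getD m 0) :
    ispec x k (m+1) k = ispec x k m k + 1 := by
  unfold ispec
  have hle : x.getD m 0 ≤ x.getD k 0 := not_lt.mp hxy
  have h1 : ¬ (k < m + 1 ∧ x.getD k 0 < x.getD k 0) := by rintro ⟨hh, _⟩; omega
  have h2 : ¬ (k < m ∧ x.getD k 0 < x.getD k 0) := by rintro ⟨hh, _⟩; omega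
  rw [if_pos rfl, if_pos rfl, if_neg h1, if_neg h2, List.range_succ, List.countP_append]
  have : List.countP (fun j => decide (x.getD j 0 ≤ x.getD k 0)) [m] = 1 := by
    simp only [List.countP_cons, List.countP_nil, decide_eq_true_eq]
    rw [if_pos hle]
  omega

lemma ispec_succ_other_t (x : List Int) (k m p : Nat) (hxy : x.getD k 0 < x.getD m 0)
    (hpm : p ≠ m) : ispec x k (m+1) p = ispec x k m p := by
  unfold ispec
  have h2 : (p < m + 1 ∧ x.getD k 0 < x.getD p 0) ↔ (p < m ∧ x.getD k 0 < x.getD p 0) :=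
    ⟨fun h => ⟨by omega, h.2⟩, fun h => ⟨by omega, h.2⟩⟩
  have h3 : (List.range (m+1)).countP (fun j => decide (x.getD j 0 ≤ x.getD k 0)) =
      (List.range m).countP (fun j => decide (x.getD j 0 ≤ x.getD k 0)) := by
    rw [List.range_succ, List.countP_append]
    have hnle : ¬ x.getD m 0 ≤ x.getD k 0 := not_le.mpr hxy
    simp only [List.countP_cons, List.countP_nil, decide_eq_true_eq]
    rw [if_neg hnle]
    omega
  rw [h3, if_congr h2 rfl rfl]

lemma ispec_succ_other_f (x : List Int) (k m p : Nat) (hxy : ¬ x.getD k 0 < x.getD m 0)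
    (hpk : p ≠ k) : ispec x k (m+1) p = ispec x k m p := by
  unfold ispec
  rw [if_neg hpk, if_neg hpk]
  have h2 : (p < m + 1 ∧ x.getD k 0 < x.getD p 0) ↔ (p < m ∧ x.getD k 0 < x.getD p 0) := by
    constructor
    · rintro ⟨h1, hx⟩
      refine ⟨?_, hx⟩
      rcases Nat.lt_succ_iff_lt_or_eq.mp h1 with h' | h'
      · exact h'
      · exact absurd (h' ▸ hx) hxy
    · rintro ⟨h1, hx⟩
      exact ⟨by omega, hx⟩
  rw [if_congr h2 rfl rfl]

-- one inner step
lemma inner_step (x : List Int) (k m : Nat) (hm : m < k) (hk : k < x.length)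
    (c : List Int) (hlen : c.length = x.length)
    (hc : ∀ p, p < x.length → c.getD p 0 = (ispec x k m p : Int)) :
    let c' := if x.getD k 0 < x.getD m 0 then c.set m (c.getD m 0 + 1) else c.set k (c.getD k 0 + 1)
    c'.length = x.length ∧ ∀ p, p < x.length → c'.getD p 0 = (ispec x k (m+1) p : Int) := by
  intro c'
  constructor
  · simp only [c']
    split_ifs <;> simp [hlen]
  · intro p hp
    by_cases hxy : x.getD k 0 < x.getD m 0
    · simp only [c', if_pos hxy]
      by_cases hpm : p = m
      · rw [hpm, getD_set_eq c m _ (by omega), hc m (by omega), ispec_succ_m x k m hm hxy]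
        push_cast
        ring
      · rw [getD_set_ne c m p _ hpm, hc p hp, ispec_succ_other_t x k m p hxy hpm]
    · simp only [c', if_neg hxy]
      by_cases hpk : p = k
      · rw [hpk, getD_set_eq c k _ (by omega), hc k (by omega), ispec_succ_kk x k m hm hxy]
        push_cast
        ring
      · rw [getD_set_ne c k p _ hpk, hc p hp, ispec_succ_other_f x k m p hxy hpk]

-- the inner fold
lemma inner_fold_aux (x : List Int) (k : Nat) (hk : k < x.length) :
    ∀ (m : Nat), m ≤ k → ∀ (c : List Int), c.length = x.length →
      (∀ p, p < x.length → c.getD p 0 = (ispec x k 0 p : Int)) →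
      ((PySem.List.pyRange 0 (m : Int) 1).foldl (fun c j =>
        if PySem.List.pyGetD x (k : Int) 0 < PySem.List.pyGetD x j 0 then
          PySem.List.pySetD c j (PySem.List.pyGetD c j 0 + 1)
        else
          PySem.List.pySetD c (k : Int) (PySem.List.pyGetD c (k : Int) 0 + 1)) c).length = x.length ∧
      ∀ p, p < x.length →
        ((PySem.List.pyRange 0 (m : Int) 1).foldl (fun c j =>
          if PySem.List.pyGetD x (k : Int) 0 < PySem.List.pyGetD x j 0 then
            PySem.List.pySetD c j (PySem.List.pyGetD c j 0 + 1)
          else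
            PySem.List.pySetD c (k : Int) (PySem.List.pyGetD c (k : Int) 0 + 1)) c).getD p 0 = (ispec x k m p : Int) := by
  intro m
  induction m with
  | zero =>
    intro _ c hlen hc
    rw [show ((0 : Nat) : Int) = 0 by rfl, PySem.List.pyRange_one_eq_nil (by omega)]
    exact ⟨hlen, hc⟩
  | succ m ih =>
    intro hm c hlen hc
    have hcast : ((m + 1 : Nat) : Int) = (m : Int) + 1 := by push_cast; ring
    rw [hcast, PySem.List.pyRange_one_succ_right (by positivity), List.foldl_append]
    obtain ⟨ihlen, ihval⟩ := ih (by omega) c hlen hc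
    have hstep := inner_step x k m (by omega) hk _ ihlen ihval
    simp only [List.foldl_cons, List.foldl_nil]
    simp only [PySem.List.pyGetD_natCast, PySem.List.pySetD_natCast] at hstep ⊢
    split_ifs with hxy
    · rw [if_pos hxy] at hstep
      exact hstep
    · rw [if_neg hxy] at hstep
      exact hstep

lemma aspec_one (x : List Int) (p : Nat) : aspec x 1 p = 0 := by
  unfold aspec
  have h1 : List.countP (fun i => decide (p < i ∧ x.getD i 0 < x.getD p 0)) (List.range 1) = 0 := by
    simp
  rw [h1]
  split_ifs with h
  · have hp0 : p = 0 := by omega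
    subst hp0
    simp
  · rfl

-- the outer fold
lemma outer_fold (x : List Int) (k : Nat) (h1 : 1 ≤ k) (hk : k ≤ x.length)
    (c : List Int) (hlen : c.length = x.length)
    (hc : ∀ p, p < x.length → c.getD p 0 = 0) :
    ((PySem.List.pyRange 1 (k : Int) 1).foldl (fun c i =>
      (PySem.List.pyRange 0 i 1).foldl (fun c j =>
        if PySem.List.pyGetD x i 0 < PySem.List.pyGetD x j 0 then
          PySem.List.pySetD c j (PySem.List.pyGetD c j 0 + 1)
        else
          PySem.List.pySetD c i (PySem.List.pyGetD c i 0 + 1)) c) c).length = x.length ∧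
    ∀ p, p < x.length →
      ((PySem.List.pyRange 1 (k : Int) 1).foldl (fun c i =>
        (PySem.List.pyRange 0 i 1).foldl (fun c j =>
          if PySem.List.pyGetD x i 0 < PySem.List.pyGetD x j 0 then
            PySem.List.pySetD c j (PySem.List.pyGetD c j 0 + 1)
          else
            PySem.List.pySetD c i (PySem.List.pyGetD c i 0 + 1)) c) c).getD p 0 = (aspec x k p : Int) := by
  induction k, h1 using Nat.le_induction with
  | base =>
    rw [show ((1 : Nat) : Int) = 1 by rfl, PySem.List.pyRange_one_eq_nil (by omega)]
    refine ⟨hlen, fun p hp => ?_⟩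
    simp only [List.foldl_nil]
    rw [hc p hp, aspec_one x p]
    rfl
  | succ k hk1 ih =>
    have hcast : ((k + 1 : Nat) : Int) = (k : Int) + 1 := by push_cast; ring
    rw [hcast, PySem.List.pyRange_one_succ_right (by exact_mod_cast hk1), List.foldl_append]
    obtain ⟨ihlen, ihval⟩ := ih (by omega)
    have hval0 : ∀ p, p < x.length →
        ((PySem.List.pyRange 1 (k : Int) 1).foldl (fun c i =>
          (PySem.List.pyRange 0 i 1).foldl (fun c j =>
            if PySem.List.pyGetD x i 0 < PySem.List.pyGetD x j 0 then
              PySem.List.pySetD c j (PySem.List.pyGetD c j 0 + 1)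
            else
              PySem.List.pySetD c i (PySem.List.pyGetD c i 0 + 1)) c) c).getD p 0 = (ispec x k 0 p : Int) := by
      intro p hp
      rw [ihval p hp, ispec_zero]
    have hinner := inner_fold_aux x k (by omega) k (le_refl k) _ ihlen hval0
    simp only [List.foldl_cons, List.foldl_nil]
    refine ⟨hinner.1, fun p hp => ?_⟩
    rw [hinner.2 p hp, ispec_last]

lemma aspec_final (x : List Int) (p : Nat) (hp : p < x.length) :
    aspec x x.length p = ecF x p := by
  unfold aspec ecF
  rw [if_pos hp]
  rw [← countP_range_restrict x.length p (fun j => x.getD j 0 ≤ x.getD p 0) (le_of_lt hp)]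
  rw [← countP_or_disjoint (List.range x.length)
        (fun j => p < j ∧ x.getD j 0 < x.getD p 0)
        (fun j => j < p ∧ x.getD j 0 ≤ x.getD p 0)
        (fun j => by omega)]
  apply List.countP_congr
  intro j hj
  simp only [Bool.or_eq_true, decide_eq_true_eq]
  by_cases hjp : j = p
  · subst hjp
    omega
  · omega

lemma c0_length (x : List Int) :
    ((PySem.List.pyRange 0 (x.length : Int) 1).map (fun _ => (0 : Int))).length = x.length := by
  simp [PySem.List.length_pyRange_one]

lemma c0_getD (x : List Int) (p : Nat) :
    ((PySem.List.pyRange 0 (x.length : Int) 1).map (fun _ => (0 : Int))).getD p 0 = 0 := by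
  apply getD_all_zero
  intro a ha
  simp at ha
  exact ha.2

lemma enumcount_length (x : List Int) : (enumcount x).length = x.length := by
  unfold enumcount
  simp only [PySem.List.len_eq]
  rcases Nat.eq_zero_or_pos x.length with h0 | h1
  · rw [h0]
    rw [show ((0 : Nat) : Int) = 0 by rfl, PySem.List.pyRange_one_eq_nil (a := 1) (by omega)]
    simp
  · exact (outer_fold x x.length h1 (le_refl _) _ (c0_length x) (fun p _ => c0_getD x p)).1

lemma enumcount_getD (x : List Int) (p : Nat) (hp : p < x.length) :
    (enumcount x).getD p 0 = (ecF x p : Int) := by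
  unfold enumcount
  simp only [PySem.List.len_eq]
  have h1 : 1 ≤ x.length := by omega
  rw [(outer_fold x x.length h1 (le_refl _) _ (c0_length x) (fun p _ => c0_getD x p)).2 p hp, aspec_final x p hp]

--------------------------------------------------------------------------
-- B-side: the stable argsort is ordered by the lexicographic pair (x[j], j)
--------------------------------------------------------------------------

def ilex (x : List Int) (a b : Int) : Bool :=
  decide (PySem.List.pyGetD x a 0 < PySem.List.pyGetD x b 0 ∨
    (PySem.List.pyGetD x a 0 = PySem.List.pyGetD x b 0 ∧ a < b))

lemma ilex_iff (x : List Int) (a b : Int) :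
    ilex x a b = true ↔
      (PySem.List.pyGetD x a 0 < PySem.List.pyGetD x b 0 ∨
        (PySem.List.pyGetD x a 0 = PySem.List.pyGetD x b 0 ∧ a < b)) := by
  simp [ilex]

lemma insertBy_pairwise (x : List Int) (v : Int) (acc : List Int)
    (h1 : acc.Pairwise (fun a b => ilex x a b = true))
    (h2 : ∀ a ∈ acc, a < v) :
    (PySem.List.insertBy (fun a b => decide (PySem.List.pyGetD x a 0 < PySem.List.pyGetD x b 0)) v acc).Pairwise (fun a b => ilex x a b = true) := by
  induction acc with
  | nil =>
    rw [PySem.List.insertBy]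
    exact List.pairwise_singleton _ _
  | cons y ys ih =>
    rw [PySem.List.insertBy]
    rw [List.pairwise_cons] at h1
    obtain ⟨hy, hys⟩ := h1
    by_cases hvy : PySem.List.pyGetD x v 0 < PySem.List.pyGetD x y 0
    · rw [if_pos (by simpa using hvy)]
      apply List.pairwise_cons.mpr
      refine ⟨?_, List.pairwise_cons.mpr ⟨hy, hys⟩⟩
      intro b hb
      rcases List.mem_cons.mp hb with rfl | hb
      · exact (ilex_iff x v b).mpr (Or.inl hvy)
      · have hyb := (ilex_iff x y b).mp (hy b hb)
        apply (ilex_iff x v b).mpr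
        rcases hyb with h | ⟨h, _⟩
        · exact Or.inl (lt_trans hvy h)
        · exact Or.inl (h ▸ hvy)
    · rw [if_neg (by simpa using hvy)]
      apply List.pairwise_cons.mpr
      refine ⟨?_, ih hys (fun a ha => h2 a (List.mem_cons_of_mem _ ha))⟩
      intro b hb
      rcases (PySem.List.mem_insertBy _ _ _ _).mp hb with rfl | hb
      · apply (ilex_iff x y b).mpr
        rcases lt_or_eq_of_le (not_lt.mp hvy) with h | h
        · exact Or.inl h
        · exact Or.inr ⟨h, h2 y List.mem_cons_self⟩
      · exact hy b hb

lemma foldl_insertBy_pairwise (x : List Int) (xs : List Int) :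
    ∀ (acc : List Int), acc.Pairwise (fun a b => ilex x a b = true) →
      (∀ a ∈ acc, ∀ b ∈ xs, a < b) → xs.Pairwise (· < ·) →
      (xs.foldl (fun acc v => PySem.List.insertBy (fun a b => decide (PySem.List.pyGetD x a 0 < PySem.List.pyGetD x b 0)) v acc) acc).Pairwise (fun a b => ilex x a b = true) := by
  induction xs with
  | nil =>
    intro acc hacc _ _
    exact hacc
  | cons v t ih =>
    intro acc hacc hcross hx
    rw [List.pairwise_cons] at hx
    rw [List.foldl_cons]
    apply ih
    · exact insertBy_pairwise x v acc hacc (fun a ha => hcross a ha v List.mem_cons_self)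
    · intro a ha b hb
      rcases (PySem.List.mem_insertBy _ _ _ _).mp ha with rfl | ha
      · exact hx.1 b hb
      · exact hcross a ha b (List.mem_cons_of_mem _ hb)
    · exact hx.2

lemma sorted_stable (x : List Int) (xs : List Int) (hx : xs.Pairwise (· < ·)) :
    (PySem.List.sorted xs (fun j => PySem.List.pyGetD x j 0) false).Pairwise (fun a b => ilex x a b = true) := by
  rw [PySem.List.sorted_eq_foldl_insertBy]
  exact foldl_insertBy_pairwise x xs [] List.Pairwise.nil (by simp) hx

lemma pos_count (x : List Int) (order : List Int) (hord : order.Pairwise (fun a b => ilex x a b = true))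
    (p : Nat) (hp : p < order.length) :
    order.countP (fun j => ilex x j order[p]) = p := by
  have hpg := List.pairwise_iff_getElem.mp hord
  have hTD := List.take_append_drop p order
  set i := order[p] with hi
  have htake : (order.take p).countP (fun j => ilex x j i) = p := by
    have hlen : (order.take p).length = p := by
      simp [Nat.le_of_lt hp]
    have hval : ∀ a ∈ order.take p, (fun j => ilex x j i) a = true := by
      intro a ha
      obtain ⟨q, hq, hqa⟩ := List.mem_iff_getElem.mp ha
      have hq' : q < p := by
        rw [hlen] at hq
        exact hq
      have hqe : (order.take p)[q] = order[q] := List.getElem_take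
      rw [hqe] at hqa
      rw [← hqa, hi]
      exact hpg q p (by omega) hp hq'
    rw [List.countP_eq_length.mpr hval, hlen]
  have hdrop : (order.drop p).countP (fun j => ilex x j i) = 0 := by
    apply List.countP_eq_zero.mpr
    intro a ha
    obtain ⟨q, hq, hqa⟩ := List.mem_iff_getElem.mp ha
    have hdl : (order.drop p).length = order.length - p := by simp
    have hqe : (order.drop p)[q] = order[p + q]'(by omega) := List.getElem_drop
    rw [hqe] at hqa
    rcases Nat.eq_zero_or_pos q with h0 | h0
    · subst h0
      rw [← hqa, hi]
      simp [ilex]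
    · have hlex := (ilex_iff x order[p] (order[p+q]'(by omega))).mp (hpg p (p+q) hp (by omega) (by omega))
      rw [← hqa, hi]
      intro hcon
      rw [ilex_iff] at hcon
      omega
  calc order.countP (fun j => ilex x j i)
      = (order.take p ++ order.drop p).countP (fun j => ilex x j i) := by rw [hTD]
    _ = p := by
        rw [List.countP_append, htake, hdrop]
        omega

-- writing the inverse permutation
lemma fold_set_untouched (ps : List (Int × Int)) (i : Nat) :
    ∀ (c0 : List Int), (∀ q ∈ ps, 0 ≤ q.2 ∧ q.2 ≠ (i : Int)) →
      (ps.foldl (fun c q => PySem.List.pySetD c q.2 q.1) c0).getD i 0 = c0.getD i 0 := by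
  induction ps with
  | nil =>
    intro c0 _
    rfl
  | cons q t ih =>
    intro c0 h
    rw [List.foldl_cons]
    rw [ih _ (fun r hr => h r (List.mem_cons_of_mem _ hr))]
    obtain ⟨h0, hne⟩ := h q List.mem_cons_self
    rw [PySem.List.pySetD_of_nonneg c0 q.1 h0]
    have hi : i ≠ q.2.toNat := by omega
    exact getD_set_ne _ _ _ _ hi

lemma fold_set_length (ps : List (Int × Int)) :
    ∀ (c0 : List Int), (ps.foldl (fun c q => PySem.List.pySetD c q.2 q.1) c0).length = c0.length := by
  induction ps with
  | nil =>
    intro c0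
    rfl
  | cons q t ih =>
    intro c0
    rw [List.foldl_cons, ih, PySem.List.length_pySetD]

lemma fold_set_hit (order : List Int) :
    ∀ (c0 : List Int) (s : Int) (p : Nat), order.Nodup → (∀ a ∈ order, 0 ≤ a) →
      ∀ (hp : p < order.length), order[p] < (c0.length : Int) →
      ((PySem.List.enumerate order s).foldl (fun c q => PySem.List.pySetD c q.2 q.1) c0).getD (order[p]).toNat 0 = s + p := by
  induction order with
  | nil =>
    intro c0 s p _ _ hp _
    exact absurd hp (Nat.not_lt_zero p)
  | cons o rest ih =>
    intro c0 s p hnd hnn hp hlt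
    rw [PySem.List.enumerate_cons, List.foldl_cons]
    have ho : 0 ≤ o := hnn o List.mem_cons_self
    cases p with
    | zero =>
      simp only [List.getElem_cons_zero] at hlt ⊢
      rw [fold_set_untouched _ _ _ ?side]
      case side =>
        intro q hq
        obtain ⟨k, hk, hqk⟩ := (PySem.List.mem_enumerate_iff _ _ _).mp hq
        have hmem : q.2 ∈ rest := by
          rw [hqk]
          exact List.getElem_mem hk
        refine ⟨hnn q.2 (List.mem_cons_of_mem _ hmem), ?_⟩
        have hno : o ∉ rest := (List.nodup_cons.mp hnd).1
        have : q.2 ≠ o := fun hcon => hno (hcon ▸ hmem)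
        omega
      rw [PySem.List.pySetD_of_nonneg c0 s ho, getD_set_eq _ _ _ (by omega)]
      simp
    | succ p' =>
      simp only [List.getElem_cons_succ] at hlt ⊢
      have hres := ih (PySem.List.pySetD c0 o s) (s+1) p' (List.nodup_cons.mp hnd).2
        (fun a ha => hnn a (List.mem_cons_of_mem _ ha)) (by simpa using hp)
        (by rw [PySem.List.length_pySetD]; exact hlt)
      rw [hres]
      push_cast
      ring

lemma enumcount_alt_length (x : List Int) : (enumcount_alt x).length = x.length := by
  simp only [enumcount_alt, PySem.List.len_eq]
  rw [fold_set_length]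
  simp [PySem.List.pyRepeat_singleton]

lemma enumcount_alt_getD (x : List Int) (p : Nat) (hp : p < x.length) :
    (enumcount_alt x).getD p 0 = (ecF x p : Int) := by
  simp only [enumcount_alt, PySem.List.len_eq]
  set order := PySem.List.sorted (PySem.List.pyRange 0 (x.length : Int) 1)
    (fun j => PySem.List.pyGetD x j 0) false with hod
  have hperm : order.Perm (PySem.List.pyRange 0 (x.length : Int) 1) :=
    PySem.List.sorted_perm _ _ _
  have hlen : order.length = x.length := by
    rw [hperm.length_eq]
    simp [PySem.List.length_pyRange_one]
  have hnodup : order.Nodup := hperm.nodup_iff.mpr (PySem.List.nodup_pyRange_one 0 _)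
  have hnn : ∀ a ∈ order, 0 ≤ a := by
    intro a ha
    have := (PySem.List.mem_pyRange_one).mp (hperm.subset ha)
    exact this.1
  have hmem : (p : Int) ∈ order := by
    apply hperm.mem_iff.mpr
    rw [PySem.List.mem_pyRange_one]
    exact ⟨by positivity, by exact_mod_cast hp⟩
  obtain ⟨t, ht, hto⟩ := List.mem_iff_getElem.mp hmem
  have hc0len : (PySem.List.pyRepeat [(0 : Int)] ((x.length : Int))).length = x.length := by
    simp [PySem.List.pyRepeat_singleton]
  have hlt : order[t] < ((PySem.List.pyRepeat [(0 : Int)] ((x.length : Int))).length : Int) := by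
    rw [hto, hc0len]
    exact_mod_cast hp
  have hhit := fold_set_hit order (PySem.List.pyRepeat [(0 : Int)] ((x.length : Int))) 0 t hnodup hnn ht hlt
  rw [hto] at hhit
  simp only [Int.toNat_natCast] at hhit
  rw [hhit]
  have hcnt := pos_count x order
    (sorted_stable x _ (PySem.List.pairwise_lt_pyRange_one 0 _)) t ht
  rw [hto] at hcnt
  have hecf : order.countP (fun j => ilex x j (p : Int)) = ecF x p := by
    rw [hperm.countP_eq]
    rw [PySem.List.pyRange_one]
    rw [List.countP_map]
    unfold ecF
    apply List.countP_congr
    intro k hk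
    simp only [Function.comp, zero_add, ilex, PySem.List.pyGetD_natCast, decide_eq_true_eq]
    omega
  omega

-- ===== VERDICT (by name: the statement is the Claim_ definition above) =====
theorem enumcount_spec : Claim_equal_enumcount := by
  intro x _
  unfold Spec_enumcount
  apply List.ext_getElem
  · rw [enumcount_length, enumcount_alt_length]
  · intro i h1 h2
    have hi : i < x.length := by rw [enumcount_length] at h1; exact h1
    have e1 := enumcount_getD x i hi
    have e2 := enumcount_alt_getD x i hi
    rw [List.getD_eq_getElem _ _ h1] at e1
    rw [List.getD_eq_getElem _ _ h2] at e2
    rw [e1, e2]
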